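-- pv_equiv track=rewrite | github.com/Kevin-san/ToolLesson | core/tools/common_coder.py | tenth2anyth
-- ===== SOURCE A (Python) =====
-- def tenth2anyth(result_str,tenth_num,source_list):
--     if tenth_num==0:
--         return result_str
--     len_num = len(source_list)
--     first_int = tenth_num%len_num
--     second_int = tenth_num-first_int
--     if tenth_num < len_num:
--         first_int=tenth_num
--     if first_int==len_num:
--         first_int=0
--     result_str = source_list[first_int]+result_str
--     return tenth2anyth(result_str, second_int//len_num, source_list)
-- ===== SOURCE B (Python) =====
-- def tenth2anyth(result_str, tenth_num, source_list):
--     len_num = len(source_list)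
--     while tenth_num != 0:
--         result_str = source_list[tenth_num % len_num] + result_str
--         tenth_num //= len_num
--     return result_str
-- ===== Notes on version B (the rewrite author's own statement) =====
-- stated objective: simpler
-- what changed: Replaced the recursion with its two redundant branch corrections (tenth_num<len, first_int==len) and the second_int intermediate by a plain while-loop that prepends source_list[tenth_num % len_num] and floor-divides tenth_num each step.
import Mathlib
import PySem

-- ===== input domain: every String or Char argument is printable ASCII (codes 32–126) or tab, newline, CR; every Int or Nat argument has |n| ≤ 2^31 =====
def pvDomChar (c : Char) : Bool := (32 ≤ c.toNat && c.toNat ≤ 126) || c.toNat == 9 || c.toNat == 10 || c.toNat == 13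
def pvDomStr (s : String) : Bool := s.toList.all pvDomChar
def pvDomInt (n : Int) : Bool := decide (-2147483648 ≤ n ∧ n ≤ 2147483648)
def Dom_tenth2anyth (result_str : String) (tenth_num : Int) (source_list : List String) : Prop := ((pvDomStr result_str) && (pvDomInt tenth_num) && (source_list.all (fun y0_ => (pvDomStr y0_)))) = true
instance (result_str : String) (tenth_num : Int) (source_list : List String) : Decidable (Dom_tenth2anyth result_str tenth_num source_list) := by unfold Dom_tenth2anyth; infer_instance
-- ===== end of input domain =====

-- B replaces A's recursion (with its two redundant branch corrections and the
-- second_int intermediate) by a plain while-loop dividing tenth_num by the base;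
-- objective: simpler.  Recursion/loop made total with fuel; on Pre_ the fuel
-- tenth_num.toNat + 1 always suffices.

-- ===== PORT A =====
-- literal transliteration of A; fuel only makes the recursion total,
-- the Python raises (RecursionError) exactly where fuel could run out on Pre_'s complement.
-- list indexing source_list[first_int] is PySem.List.pyGet? (getD "" is unreachable inside Pre_)
def tenth2anythAuxA : Nat → String → Int → List String → String
  | 0, r, _, _ => r
  | fuel + 1, result_str, tenth_num, source_list =>
    if tenth_num = 0 then result_str
    else
      let len_num : Int := source_list.length
      let first_int := PySem.Int.mod tenth_num len_num
      let second_int := tenth_num - first_int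
      let first_int := if tenth_num < len_num then tenth_num else first_int
      let first_int := if first_int = len_num then 0 else first_int
      let result_str := (PySem.List.pyGet? source_list first_int).getD "" ++ result_str
      tenth2anythAuxA fuel result_str (PySem.Int.floordiv second_int len_num) source_list

def tenth2anyth (result_str : String) (tenth_num : Int) (source_list : List String) : String :=
  tenth2anythAuxA (tenth_num.toNat + 1) result_str tenth_num source_list

-- ===== PORT B =====
-- literal transliteration of Source B's while-loop (fuel-totalised as above)
def tenth2anythAuxB (len_num : Int) (source_list : List String) : Nat → String → Int → String
  | 0, r, _ => r
  | fuel + 1, result_str, tenth_num =>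
    if tenth_num ≠ 0 then
      tenth2anythAuxB len_num source_list fuel
        ((PySem.List.pyGet? source_list (PySem.Int.mod tenth_num len_num)).getD "" ++ result_str)
        (PySem.Int.floordiv tenth_num len_num)
    else result_str

def tenth2anyth_alt (result_str : String) (tenth_num : Int) (source_list : List String) : String :=
  tenth2anythAuxB (source_list.length : Int) source_list (tenth_num.toNat + 1) result_str tenth_num

-- ===== PRECONDITION & SPEC =====
-- Pre_ excludes exactly the inputs where the Python A raises: negative tenth_num and
-- base 1 (RecursionError, sometimes IndexError) and empty source_list with tenth_num ≠ 0
-- (ZeroDivisionError).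
def Pre_tenth2anyth (result_str : String) (tenth_num : Int) (source_list : List String) : Prop :=
  0 ≤ tenth_num ∧ (tenth_num = 0 ∨ 2 ≤ source_list.length)
instance (result_str : String) (tenth_num : Int) (source_list : List String) : Decidable (Pre_tenth2anyth result_str tenth_num source_list) := by unfold Pre_tenth2anyth; infer_instance

def pvWitness_tenth2anyth : String × Int × List String := ("", 11, ["0", "1"])

def Spec_tenth2anyth (result_str : String) (tenth_num : Int) (source_list : List String) (out : String) : Prop := out = tenth2anyth_alt result_str tenth_num source_list
instance (result_str : String) (tenth_num : Int) (source_list : List String) (out : String) : Decidable (Spec_tenth2anyth result_str tenth_num source_list out) := by unfold Spec_tenth2anyth; infer_instance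

-- ===== CLAIM (what is proved, stated in full; the proofs are below) =====
def Claim_equal_tenth2anyth : Prop := ∀ (result_str : String) (tenth_num : Int) (source_list : List String), Dom_tenth2anyth result_str tenth_num source_list → Pre_tenth2anyth result_str tenth_num source_list → Spec_tenth2anyth result_str tenth_num source_list (tenth2anyth result_str tenth_num source_list)

-- ===== LEMMAS AND PROOFS =====

-- the core agreement: with 0 ≤ t and base ≥ 2, for any sufficient fuels the two loops agree
lemma aux_eq (fa : Nat) : ∀ (fb : Nat) (r : String) (t : Int) (s : List String),
    0 ≤ t → 2 ≤ (s.length : Int) → t.toNat < fa → t.toNat < fb →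
    tenth2anythAuxA fa r t s = tenth2anythAuxB (s.length : Int) s fb r t := by
  induction fa with
  | zero => intro fb r t s _ _ h _; omega
  | succ fa ih =>
    intro fb r t s ht hlen hfa hfb
    cases fb with
    | zero => omega
    | succ fb =>
      simp only [tenth2anythAuxA, tenth2anythAuxB]
      by_cases h0 : t = 0
      · simp [h0]
      · have hlt : (0 : Int) < (s.length : Int) := by omega
        rw [if_neg h0, if_pos h0]
        have hmod : PySem.Int.mod t (s.length : Int) = t % (s.length : Int) :=
          PySem.Int.mod_eq_emod_of_pos hlt
        have hm0 : 0 ≤ t % (s.length : Int) := Int.emod_nonneg t (by omega)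
        have hmlt : t % (s.length : Int) < (s.length : Int) := Int.emod_lt_of_pos t hlt
        -- A's corrected index equals t % len
        have hidx :
            (if (if t < (s.length : Int) then t else PySem.Int.mod t (s.length : Int)) = (s.length : Int)
               then (0 : Int)
               else if t < (s.length : Int) then t else PySem.Int.mod t (s.length : Int))
            = PySem.Int.mod t (s.length : Int) := by
          by_cases htl : t < (s.length : Int)
          · have : t % (s.length : Int) = t := Int.emod_eq_of_lt ht htl
            rw [if_pos htl] at *
            rw [if_neg (by omega), hmod, this]
          · rw [if_neg htl, hmod, if_neg (by omega)]
        rw [hidx]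
        -- A's next argument equals t // len
        have hdiv : PySem.Int.floordiv (t - PySem.Int.mod t (s.length : Int)) (s.length : Int)
            = PySem.Int.floordiv t (s.length : Int) := by
          rw [PySem.Int.floordiv_eq_ediv_of_pos hlt, PySem.Int.floordiv_eq_ediv_of_pos hlt,
            hmod]
          conv_lhs => rw [Int.emod_def]
          rw [sub_sub_cancel, Int.mul_ediv_cancel_left _ (by omega)]
        rw [hdiv]
        have hq : PySem.Int.floordiv t (s.length : Int) = t / (s.length : Int) :=
          PySem.Int.floordiv_eq_ediv_of_pos hlt
        have hq0 : 0 ≤ t / (s.length : Int) := Int.ediv_nonneg ht (by omega)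
        have hqlt : t / (s.length : Int) < t := by
          have h1 : t / (s.length : Int) = ((t.toNat / s.length : Nat) : Int) := by
            rw [Int.natCast_ediv]
            simp [Int.toNat_of_nonneg ht]
          have h2 : t.toNat / s.length < t.toNat := Nat.div_lt_self (by omega) (by omega)
          omega
        exact ih fb _ _ s (hq ▸ hq0) hlen (by rw [hq]; omega) (by rw [hq]; omega)

-- ===== VERDICT (by name: the statement is the Claim_ definition above) =====
theorem tenth2anyth_spec : Claim_equal_tenth2anyth := by
  intro r t s _ hpre
  unfold Spec_tenth2anyth tenth2anyth tenth2anyth_alt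
  rcases hpre with ⟨ht, h⟩
  rcases h with h0 | hlen
  · subst h0; simp [tenth2anythAuxA, tenth2anythAuxB]
  · exact aux_eq _ _ r t s ht (by exact_mod_cast hlen) (by omega) (by omega)
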